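-- pv_equiv track=rewrite | github.com/gstarielio-hash/tariel-v2 | web/app/domains/chat/report_pack_pre_laudo.py | _should_ignore_candidate_path
-- ===== SOURCE A (Python) =====
-- _PRE_LAUDO_IGNORED_PATH_PREFIXES: tuple[str, ...] = (
--     "schema_type",
--     "schema_version",
--     "family_key",
--     "family_label",
--     "template_code",
--     "template_label",
--     "contract_name",
--     "contract_version",
--     "pack_version",
--     "analysis_basis",
--     "document_projection",
--     "document_contract",
--     "document_control",
--     "delivery_package",
--     "tokens",
--     "case_context",
--     "tenant_branding",
--     "mesa_review",
--     "render_mode",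
-- )
--
-- def _should_ignore_candidate_path(path: str) -> bool:
--     normalized = str(path or "").strip(".")
--     if not normalized:
--         return False
--     return any(
--         normalized == prefix or normalized.startswith(f"{prefix}.")
--         for prefix in _PRE_LAUDO_IGNORED_PATH_PREFIXES
--     )
-- ===== SOURCE B (Python) =====
-- # Sorted copy of the ignored prefixes; answered by hand-rolled binary search (bisect_left).
-- _SORTED_IGNORED = sorted((
--     "schema_type",
--     "schema_version",
--     "family_key",
--     "family_label",
--     "template_code",
--     "template_label",
--     "contract_name",
--     "contract_version",
--     "pack_version",
--     "analysis_basis",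
--     "document_projection",
--     "document_contract",
--     "document_control",
--     "delivery_package",
--     "tokens",
--     "case_context",
--     "tenant_branding",
--     "mesa_review",
--     "render_mode",
-- ))
--
--
-- def _should_ignore_candidate_path(path: str) -> bool:
--     normalized = str(path or "").strip(".")
--     if not normalized:
--         return False
--     dot = normalized.find(".")
--     first = normalized if dot < 0 else normalized[:dot]
--     lo, hi = 0, len(_SORTED_IGNORED)
--     while lo < hi:
--         mid = (lo + hi) // 2
--         if _SORTED_IGNORED[mid] < first:
--             lo = mid + 1
--         else:
--             hi = mid
--     return lo < len(_SORTED_IGNORED) and _SORTED_IGNORED[lo] == first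
-- ===== Notes on version B (the rewrite author's own statement) =====
-- stated objective: alternative
-- what changed: B keeps the 19 ignored prefixes in a sorted list built once at module load and answers with a hand-written bisect_left binary search on the first dot-separated segment (found via find + slice), replacing A's linear any-scan that runs an equality and a startswith test against every prefix.
import Mathlib
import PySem

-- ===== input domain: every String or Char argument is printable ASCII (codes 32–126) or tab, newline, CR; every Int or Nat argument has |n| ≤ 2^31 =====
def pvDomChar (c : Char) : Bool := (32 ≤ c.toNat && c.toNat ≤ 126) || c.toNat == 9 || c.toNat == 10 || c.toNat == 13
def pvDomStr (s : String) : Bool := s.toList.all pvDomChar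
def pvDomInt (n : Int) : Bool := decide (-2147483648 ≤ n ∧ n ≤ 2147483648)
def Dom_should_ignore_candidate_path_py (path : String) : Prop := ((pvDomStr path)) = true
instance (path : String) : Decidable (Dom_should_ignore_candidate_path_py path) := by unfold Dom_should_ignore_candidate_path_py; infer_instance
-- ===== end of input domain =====

-- B keeps the ignored prefixes sorted (built once) and binary-searches the first dot-separated
-- segment instead of A's linear scan with equality+startswith per prefix; objective: alternative.


-- ===== PORT A =====
-- _PRE_LAUDO_IGNORED_PATH_PREFIXES (module-level tuple of A)
def pvPrefixes : List (List Char) :=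
  ["schema_type".toList, "schema_version".toList, "family_key".toList, "family_label".toList,
   "template_code".toList, "template_label".toList, "contract_name".toList, "contract_version".toList,
   "pack_version".toList, "analysis_basis".toList, "document_projection".toList,
   "document_contract".toList, "document_control".toList, "delivery_package".toList,
   "tokens".toList, "case_context".toList, "tenant_branding".toList, "mesa_review".toList,
   "render_mode".toList]

def should_ignore_candidate_path_py (path : String) : Bool :=
  -- normalized = str(path or "").strip(".")  ('path or ""' is 'path' for a str argument)
  let normalized := PySem.Chars.stripChars path.toList ['.']
  if normalized = [] then false
  else pvPrefixes.any (fun p =>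
    normalized == p || PySem.Chars.startswith normalized (p ++ ['.']))

-- ===== PORT B =====
-- _SORTED_IGNORED = sorted((...)) (module-level constant of B)
def pvIgnoredTuple : List (List Char) :=
  ["schema_type".toList, "schema_version".toList, "family_key".toList, "family_label".toList,
   "template_code".toList, "template_label".toList, "contract_name".toList, "contract_version".toList,
   "pack_version".toList, "analysis_basis".toList, "document_projection".toList,
   "document_contract".toList, "document_control".toList, "delivery_package".toList,
   "tokens".toList, "case_context".toList, "tenant_branding".toList, "mesa_review".toList,
   "render_mode".toList]

def pvSortedIgnored : List (List Char) :=
  PySem.List.sorted pvIgnoredTuple (fun x => x) false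

-- the 'while lo < hi' bisect_left loop of Source B; the index mid is always in range, getD is total
def pvBisect (xs : List (List Char)) (x : List Char) (lo hi : Nat) : Nat :=
  if _h : lo < hi then
    let mid := (lo + hi) / 2
    if xs.getD mid [] < x then pvBisect xs x (mid + 1) hi
    else pvBisect xs x lo mid
  else lo
termination_by hi - lo
decreasing_by all_goals omega

def should_ignore_candidate_path_py_alt (path : String) : Bool :=
  let normalized := PySem.Chars.stripChars path.toList ['.']
  if normalized = [] then false
  else
    let dot := PySem.Chars.find normalized ['.']
    let first := if dot < 0 then normalized else PySem.List.slice normalized none (some dot)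
    let lo := pvBisect pvSortedIgnored first 0 pvSortedIgnored.length
    decide (lo < pvSortedIgnored.length) && (pvSortedIgnored.getD lo [] == first)

-- ===== PRECONDITION & SPEC =====
def Spec_should_ignore_candidate_path_py (path : String) (out : Bool) : Prop := out = should_ignore_candidate_path_py_alt path
instance (path : String) (out : Bool) : Decidable (Spec_should_ignore_candidate_path_py path out) := by unfold Spec_should_ignore_candidate_path_py; infer_instance

-- ===== CLAIM (what is proved, stated in full; the proofs are below) =====
def Claim_equal_should_ignore_candidate_path_py : Prop := ∀ (path : String), Dom_should_ignore_candidate_path_py path → Spec_should_ignore_candidate_path_py path (should_ignore_candidate_path_py path)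

-- ===== LEMMAS AND PROOFS =====

-- A's per-prefix test (exact match or "prefix." start) holds iff the first segment equals the prefix
theorem pv_seg (p l : List Char) (hp : ('.' : Char) ∉ p) :
    (l = p ∨ (p ++ ['.']) <+: l) ↔ l.takeWhile (fun c => c != '.') = p := by
  induction p generalizing l with
  | nil =>
    cases l with
    | nil => simp
    | cons c t =>
      by_cases hc : c = '.'
      · subst hc; simp
      · have hne : ¬ ('.' = c) := fun h' => hc h'.symm
        simp [hc, hne, List.cons_prefix_cons]
  | cons q ps ih =>
    have hq : q ≠ '.' := fun h' => hp (by simp [h'])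
    have hps : ('.' : Char) ∉ ps := fun h' => hp (List.mem_cons_of_mem _ h')
    cases l with
    | nil => simp
    | cons c t =>
      by_cases hc : c = '.'
      · subst hc
        have hqc : ¬ ('.' = q) := fun h' => hq h'.symm
        simp [List.cons_prefix_cons, hq, hqc]
      · have hquick : List.takeWhile (fun c => c != '.') (c :: t) = q :: ps
            ↔ (c = q ∧ List.takeWhile (fun c => c != '.') t = ps) := by
          simp [hc]
        rw [hquick, ← ih t hps]
        constructor
        · rintro (h' | h')
          · rw [List.cons_eq_cons] at h'
            exact ⟨h'.1, Or.inl h'.2⟩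
          · rw [List.cons_append, List.cons_prefix_cons] at h'
            exact ⟨h'.1.symm, Or.inr h'.2⟩
        · rintro ⟨hcq, h' | h'⟩
          · exact Or.inl (by rw [hcq, h'])
          · exact Or.inr (by rw [List.cons_append, List.cons_prefix_cons]; exact ⟨hcq.symm, h'⟩)

theorem pv_prefixes_dotfree : ∀ p ∈ pvPrefixes, ('.' : Char) ∉ p := by decide

-- B's 'first' (find + slice) is the longest dot-free prefix of the normalized path
theorem pv_singleton_prefix (a : Char) (m : List Char) : [a] <+: m ↔ m[0]? = some a := by
  cases m with
  | nil => simp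
  | cons b t => simp [List.cons_prefix_cons, eq_comm]

theorem pv_take_eq_takeWhile (l : List Char) (k : Nat) (hk : k ≤ l.length)
    (h1 : ∀ i, i < k → l[i]? ≠ some '.')
    (h2 : k = l.length ∨ l[k]? = some '.') :
    l.take k = l.takeWhile (fun c => c != '.') := by
  induction l generalizing k with
  | nil => simp at hk; simp [hk]
  | cons c t ih =>
    cases k with
    | zero =>
      rcases h2 with h2 | h2
      · simp at h2
      · simp at h2
        simp [h2]
    | succ j =>
      have hc : c ≠ '.' := by
        have := h1 0 (Nat.succ_pos j)
        simpa using this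
      have := ih j (by simpa using hk)
        (fun i hi => by simpa using h1 (i+1) (by omega))
        (by rcases h2 with h2 | h2
            · left; simpa using h2
            · right; simpa using h2)
      simp [hc, this]

theorem pv_first_eq (l : List Char) :
    (let dot := PySem.Chars.find l ['.'];
     if dot < 0 then l else PySem.List.slice l none (some dot))
      = l.takeWhile (fun c => c != '.') := by
  by_cases h : PySem.Chars.find l ['.'] < 0
  · -- not found: no dot in l, takeWhile keeps everything
    have h1 : PySem.Chars.find l ['.'] = -1 := by
      have := PySem.Chars.neg_one_le_find l ['.']
      omega
    have h2 : ¬ ['.'] <:+: l := (PySem.Chars.find_eq_neg_one_iff l ['.']).mp h1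
    have h3 : ∀ c ∈ l, (fun c => c != '.') c = true := by
      intro c hc
      simp only [bne_iff_ne, ne_eq]
      intro he
      subst he
      obtain ⟨s, t, rfl⟩ := List.append_of_mem hc
      exact h2 ⟨s, t, by simp⟩
    simp only [h, if_true]
    exact (List.takeWhile_eq_self_iff.mpr h3).symm
  · -- found: find points at the first dot; the slice is take (find)
    have h0 : 0 ≤ PySem.Chars.find l ['.'] := by omega
    obtain ⟨hpre, hmin⟩ := PySem.Chars.find_spec h0
    set d := (PySem.Chars.find l ['.']).toNat with hd
    have hat : l[d]? = some '.' := by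
      have := (pv_singleton_prefix '.' (l.drop d)).mp hpre
      simpa [List.getElem?_drop] using this
    have hdlen : d < l.length := by
      by_contra hcon
      rw [List.getElem?_eq_none (by omega)] at hat
      simp at hat
    have hbefore : ∀ i, i < d → l[i]? ≠ some '.' := by
      intro i hi he
      apply hmin i hi
      rw [pv_singleton_prefix]
      simpa [List.getElem?_drop] using he
    simp only [h, if_false]
    rw [PySem.List.slice_to l h0, ← hd]
    exact pv_take_eq_takeWhile l d (by omega) hbefore (Or.inr hat)

-- strictly increasing: sorted gives Pairwise ≤, distinctness gives ≠
theorem pv_sorted_lt : pvSortedIgnored.Pairwise (· < ·) := by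
  have h1 : pvSortedIgnored.Pairwise (· ≤ ·) := by
    simpa using PySem.List.sorted_pairwise pvIgnoredTuple (fun x => x)
  have h2 : pvSortedIgnored.Nodup := by
    have hp := PySem.List.sorted_perm pvIgnoredTuple (fun x : List Char => x) false
    exact hp.nodup_iff.mpr (by decide)
  exact (h1.and h2).imp (fun h => lt_of_le_of_ne h.1 h.2)

-- the bisect_left loop invariant
theorem pv_bisect_inv (xs : List (List Char)) (x : List Char) (hs : xs.Pairwise (· < ·)) :
    ∀ (n lo hi : Nat), hi - lo ≤ n → lo ≤ hi → hi ≤ xs.length →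
      lo ≤ pvBisect xs x lo hi ∧ pvBisect xs x lo hi ≤ hi ∧
      (∀ j, lo ≤ j → j < pvBisect xs x lo hi → xs.getD j [] < x) ∧
      (∀ j, pvBisect xs x lo hi ≤ j → j < hi → ¬ xs.getD j [] < x) := by
  intro n
  induction n with
  | zero =>
    intro lo hi h1 h2 h3
    have he : lo = hi := by omega
    subst he
    rw [pvBisect]
    simp only [lt_irrefl, dite_false]
    exact ⟨le_refl _, le_refl _, fun j hj1 hj2 => absurd (lt_of_le_of_lt hj1 hj2) (lt_irrefl _),
      fun j hj1 hj2 => absurd (lt_of_le_of_lt hj1 hj2) (lt_irrefl _)⟩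
  | succ m ih =>
    intro lo hi h1 h2 h3
    rw [pvBisect]
    by_cases hlt : lo < hi
    · simp only [hlt, dite_true]
      have hmlo : lo ≤ (lo + hi) / 2 := by omega
      have hmhi : (lo + hi) / 2 < hi := by omega
      set mid := (lo + hi) / 2 with hmid
      have hmlen : mid < xs.length := by omega
      by_cases hcmp : xs.getD mid [] < x
      · simp only [hcmp, if_true]
        obtain ⟨i1, i2, i3, i4⟩ := ih (mid + 1) hi (by omega) (by omega) h3
        refine ⟨by omega, i2, ?_, i4⟩
        intro j hj1 hj2
        rcases lt_trichotomy j mid with h | h | h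
        · have hjlen : j < xs.length := by omega
          have hlt2 := List.pairwise_iff_getElem.mp hs j mid hjlen hmlen h
          rw [List.getD_eq_getElem xs [] hjlen]
          rw [List.getD_eq_getElem xs [] hmlen] at hcmp
          exact lt_trans hlt2 hcmp
        · rw [h]; exact hcmp
        · exact i3 j (by omega) hj2
      · simp only [hcmp, if_false]
        obtain ⟨i1, i2, i3, i4⟩ := ih lo mid (by omega) (by omega) (by omega)
        refine ⟨i1, by omega, i3, ?_⟩
        intro j hj1 hj2
        rcases lt_trichotomy j mid with h | h | h
        · exact i4 j hj1 h
        · rw [h]; exact hcmp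
        · intro hcon
          have hjlen : j < xs.length := by omega
          have hlt2 := List.pairwise_iff_getElem.mp hs mid j hmlen hjlen h
          apply hcmp
          rw [List.getD_eq_getElem xs [] hmlen]
          rw [List.getD_eq_getElem xs [] hjlen] at hcon
          exact lt_trans hlt2 hcon
    · simp only [hlt, dite_false]
      have he : lo = hi := by omega
      exact ⟨le_refl _, by omega, fun j hj1 hj2 => absurd (lt_of_le_of_lt hj1 hj2) (lt_irrefl _),
        fun j hj1 hj2 => absurd hj2 (by omega)⟩

-- bisect_left + equality check decides membership in a strictly sorted list
theorem pv_bisect_mem (xs : List (List Char)) (x : List Char) (hs : xs.Pairwise (· < ·)) :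
    (decide (pvBisect xs x 0 xs.length < xs.length)
      && (xs.getD (pvBisect xs x 0 xs.length) [] == x)) = true ↔ x ∈ xs := by
  obtain ⟨i1, i2, i3, i4⟩ :=
    pv_bisect_inv xs x hs xs.length 0 xs.length (by omega) (by omega) (le_refl _)
  set i := pvBisect xs x 0 xs.length with hi
  simp only [Bool.and_eq_true, decide_eq_true_eq, beq_iff_eq]
  constructor
  · rintro ⟨hlen, heq⟩
    rw [List.getD_eq_getElem xs [] hlen] at heq
    exact heq ▸ List.getElem_mem hlen
  · intro hmem
    obtain ⟨j, hj, hje⟩ := List.mem_iff_getElem.mp hmem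
    have hij : i ≤ j := by
      by_contra hcon
      have := i3 j (Nat.zero_le _) (by omega)
      rw [List.getD_eq_getElem xs [] hj, hje] at this
      exact lt_irrefl _ this
    have hieq : i = j := by
      by_contra hcon
      have hiltj : i < j := by omega
      have hilen : i < xs.length := by omega
      have hlt2 := List.pairwise_iff_getElem.mp hs i j hilen hj hiltj
      have := i4 i (le_refl _) hilen
      rw [List.getD_eq_getElem xs [] hilen] at this
      exact this (hje ▸ hlt2)
    subst hieq
    exact ⟨hj, by rw [List.getD_eq_getElem xs [] hj, hje]⟩

-- ===== VERDICT (by name: the statement is the Claim_ definition above) =====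
theorem should_ignore_candidate_path_py_spec : Claim_equal_should_ignore_candidate_path_py := by
  intro path _
  unfold Spec_should_ignore_candidate_path_py
  unfold should_ignore_candidate_path_py should_ignore_candidate_path_py_alt
  set n := PySem.Chars.stripChars path.toList ['.'] with hn
  by_cases hne : n = []
  · simp [hne]
  · simp only [hne, if_false]
    rw [pv_first_eq]
    set T := n.takeWhile (fun c => c != '.') with hT
    rw [Bool.eq_iff_iff]
    simp only [List.any_eq_true, Bool.or_eq_true, beq_iff_eq, PySem.Chars.startswith_iff]
    rw [pv_bisect_mem pvSortedIgnored T pv_sorted_lt]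
    rw [show pvSortedIgnored = PySem.List.sorted pvIgnoredTuple (fun x => x) false from rfl,
      PySem.List.mem_sorted, show pvIgnoredTuple = pvPrefixes from rfl]
    constructor
    · rintro ⟨p, hpmem, hp⟩
      have := (pv_seg p n (pv_prefixes_dotfree p hpmem)).mp hp
      rw [← hT] at this
      rw [← this] at hpmem
      exact hpmem
    · intro hmem
      exact ⟨T, hmem, (pv_seg T n (pv_prefixes_dotfree T hmem)).mpr hT.symm⟩
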